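-- pv_equiv track=rewrite | github.com/sweps91/ATools | version_history/ATools 0.2.0.py | lists_from_indexes
-- ===== SOURCE A (Python) =====
-- def lists_from_indexes(list_of_lists, index_range):
--     """Create lists in list from indexes (columns)"""
--
--     index_list = []
--
--     for n in range (index_range + 1):
--         li = []
--         for l in list_of_lists:
--             l = l[n]
--             li.append(l)
--         index_list.append(li)
--
--     return index_list
-- ===== SOURCE B (Python) =====
-- def lists_from_indexes(list_of_lists, index_range):
--     """Create lists in list from indexes (columns)"""
--     # Row-major scatter: preallocate one bucket per column, one pass over rows.
--     cols = [[] for _ in range(index_range + 1)]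
--     for row in list_of_lists:
--         for n in range(index_range + 1):
--             cols[n].append(row[n])
--     return cols
-- ===== Notes on version B (the rewrite author's own statement) =====
-- stated objective: alternative
-- what changed: Replaces A's column-major gather (one full scan of list_of_lists per column index) by a row-major scatter: the result columns are preallocated and filled in a single pass over the rows.
import Mathlib
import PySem

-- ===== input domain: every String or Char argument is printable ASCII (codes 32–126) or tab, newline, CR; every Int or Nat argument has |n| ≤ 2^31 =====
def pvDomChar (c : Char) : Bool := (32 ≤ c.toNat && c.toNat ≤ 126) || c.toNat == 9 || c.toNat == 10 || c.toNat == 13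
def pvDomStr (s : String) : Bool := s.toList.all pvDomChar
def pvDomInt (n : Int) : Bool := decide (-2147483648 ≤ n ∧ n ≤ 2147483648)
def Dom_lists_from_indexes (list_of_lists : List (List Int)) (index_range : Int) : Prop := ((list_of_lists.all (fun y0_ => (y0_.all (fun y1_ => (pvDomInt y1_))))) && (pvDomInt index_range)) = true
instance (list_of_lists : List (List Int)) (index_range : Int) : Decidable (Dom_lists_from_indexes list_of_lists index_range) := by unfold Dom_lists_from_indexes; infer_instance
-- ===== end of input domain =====

-- B replaces A's column-major gather (one scan of the rows per column) by a row-major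
-- scatter into preallocated column buckets (one pass over the rows); same cost, different traversal.


-- ===== PORT A =====
-- column-major: for n in range(index_range+1): li = []; for l in list_of_lists: li.append(l[n])
-- l[n] is ported as pyGetD (exact under Pre_, which makes every index in range)
def lists_from_indexes (list_of_lists : List (List Int)) (index_range : Int) : List (List Int) :=
  (PySem.List.pyRange 0 (index_range + 1) 1).foldl
    (fun index_list n =>
      index_list ++ [list_of_lists.foldl (fun li l => li ++ [PySem.List.pyGetD l n 0]) []])
    []

-- ===== PORT B =====
-- row-major scatter: cols = [[] for _ in range(k)]; for row: for n in range(k): cols[n].append(row[n])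
def lists_from_indexes_alt (list_of_lists : List (List Int)) (index_range : Int) : List (List Int) :=
  let cols0 := (PySem.List.pyRange 0 (index_range + 1) 1).map (fun _ => ([] : List Int))
  list_of_lists.foldl
    (fun cols row =>
      (PySem.List.pyRange 0 (index_range + 1) 1).foldl
        (fun cols n =>
          PySem.List.pySetD cols n (PySem.List.pyGetD cols n [] ++ [PySem.List.pyGetD row n 0]))
        cols)
    cols0

-- ===== PRECONDITION & SPEC =====
-- Pre_: exactly the inputs on which A returns (no IndexError): every row is long
-- enough for every accessed column index 0..index_range.
def Pre_lists_from_indexes (list_of_lists : List (List Int)) (index_range : Int) : Prop :=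
  ∀ l ∈ list_of_lists, index_range < (l.length : Int)
instance (list_of_lists : List (List Int)) (index_range : Int) : Decidable (Pre_lists_from_indexes list_of_lists index_range) := by unfold Pre_lists_from_indexes; infer_instance

def pvWitness_lists_from_indexes : List (List Int) × Int := ([[1, 2], [3, 4]], 1)

def Spec_lists_from_indexes (list_of_lists : List (List Int)) (index_range : Int) (out : List (List Int)) : Prop := out = lists_from_indexes_alt list_of_lists index_range
instance (list_of_lists : List (List Int)) (index_range : Int) (out : List (List Int)) : Decidable (Spec_lists_from_indexes list_of_lists index_range out) := by unfold Spec_lists_from_indexes; infer_instance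

-- ===== CLAIM (what is proved, stated in full; the proofs are below) =====
def Claim_equal_lists_from_indexes : Prop := ∀ (list_of_lists : List (List Int)) (index_range : Int), Dom_lists_from_indexes list_of_lists index_range → Pre_lists_from_indexes list_of_lists index_range → Spec_lists_from_indexes list_of_lists index_range (lists_from_indexes list_of_lists index_range)

-- ===== LEMMAS AND PROOFS =====

-- A equals the closed column form.
theorem lfi_A_closed (lol : List (List Int)) (ir : Int) :
    lists_from_indexes lol ir
      = (PySem.List.pyRange 0 (ir + 1) 1).map
          (fun n => lol.map (fun l => PySem.List.pyGetD l n 0)) := by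
  unfold lists_from_indexes
  rw [PySem.List.foldl_append_singleton_eq_map]
  simp only [List.nil_append]
  refine List.map_congr_left (fun n _ => ?_)
  rw [PySem.List.foldl_append_singleton_eq_map]
  simp

-- pySetD at a nonnegative index of a range-map is a pointwise function update.
theorem pySetD_map_pyRange (m : Int) (f : Int → List Int) (j : Int)
    (h0 : 0 ≤ j) (_hj : j < m) (v : List Int) :
    PySem.List.pySetD ((PySem.List.pyRange 0 m 1).map f) j v
      = (PySem.List.pyRange 0 m 1).map (fun n => if n = j then v else f n) := by
  rw [PySem.List.pySetD_of_nonneg _ v h0]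
  apply List.ext_getElem
  · simp
  · intro k h1 h2
    simp only [List.getElem_set, List.getElem_map] at *
    rw [PySem.List.getElem_pyRange_one]
    split_ifs with hk hn hn
    · rfl
    · omega
    · omega
    · rfl

-- One row scattered over all columns j, j+1, ..., m-1.
theorem lfi_inner (row : List Int) (m : Int) :
    ∀ (k : Nat) (j : Int), j = m - k → 0 ≤ j →
      ∀ (g h : Int → List Int),
        (∀ n, j ≤ n → n < m → h n = g n ++ [PySem.List.pyGetD row n 0]) →
        (∀ n, 0 ≤ n → n < j → h n = g n) →
        (PySem.List.pyRange j m 1).foldl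
            (fun cols n =>
              PySem.List.pySetD cols n
                (PySem.List.pyGetD cols n [] ++ [PySem.List.pyGetD row n 0]))
            ((PySem.List.pyRange 0 m 1).map g)
          = (PySem.List.pyRange 0 m 1).map h := by
  intro k
  induction k with
  | zero =>
    intro j hj h0 g h _ hlo
    rw [PySem.List.pyRange_one_eq_nil (a := j) (b := m) (by omega)]
    simp only [List.foldl_nil]
    refine List.map_congr_left (fun n hn => ?_)
    rw [PySem.List.mem_pyRange_one] at hn
    exact (hlo n hn.1 (by omega)).symm
  | succ k ih =>
    intro j hj h0 g h hhi hlo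
    by_cases hjm : j < m
    · rw [PySem.List.pyRange_one_cons hjm]
      simp only [List.foldl_cons]
      rw [PySem.List.pyGetD_map_pyRange_of_nonneg _ _ _ _ h0 hjm,
          pySetD_map_pyRange m g j h0 hjm]
      have heq : (PySem.List.pyRange 0 m 1).map (fun n => if n = j then g j ++ [PySem.List.pyGetD row j 0] else g n)
          = (PySem.List.pyRange 0 m 1).map (fun n => if n = j then h n else g n) := by
        refine List.map_congr_left (fun n _ => ?_)
        split_ifs with hn
        · rw [hn, hhi j le_rfl hjm]
        · rfl
      rw [heq]
      exact ih (j + 1) (by omega) (by omega) _ h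
        (fun n h1 h2 => by rw [hhi n (by omega) h2]; rw [if_neg (by omega)])
        (fun n h1 h2 => by
          by_cases hn : n = j
          · rw [if_pos hn]
          · rw [if_neg hn]; exact hlo n h1 (by omega))
    · rw [PySem.List.pyRange_one_eq_nil (a := j) (b := m) (by omega)]
      simp only [List.foldl_nil]
      refine List.map_congr_left (fun n hn => ?_)
      rw [PySem.List.mem_pyRange_one] at hn
      exact (hlo n hn.1 (by omega)).symm

-- All rows scattered, starting from arbitrary column prefixes g.
theorem lfi_rows (m : Int) (hm : 0 ≤ m) (rows : List (List Int)) :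
    ∀ (g : Int → List Int),
      rows.foldl
        (fun cols row =>
          (PySem.List.pyRange 0 m 1).foldl
            (fun cols n =>
              PySem.List.pySetD cols n
                (PySem.List.pyGetD cols n [] ++ [PySem.List.pyGetD row n 0]))
            cols)
        ((PySem.List.pyRange 0 m 1).map g)
      = (PySem.List.pyRange 0 m 1).map
          (fun n => g n ++ rows.map (fun l => PySem.List.pyGetD l n 0)) := by
  induction rows with
  | nil => intro g; simp
  | cons row rows ih =>
    intro g
    simp only [List.foldl_cons]
    rw [lfi_inner row m m.toNat 0 (by omega) le_rfl g
          (fun n => g n ++ [PySem.List.pyGetD row n 0])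
          (fun n _ _ => rfl) (fun n h1 h2 => by omega), ih]
    simp

theorem lfi_B_closed (lol : List (List Int)) (ir : Int) :
    lists_from_indexes_alt lol ir
      = (PySem.List.pyRange 0 (ir + 1) 1).map
          (fun n => lol.map (fun l => PySem.List.pyGetD l n 0)) := by
  unfold lists_from_indexes_alt
  by_cases hm : 0 ≤ ir + 1
  · rw [lfi_rows (ir + 1) hm lol (fun _ => [])]
    simp
  · rw [PySem.List.pyRange_one_eq_nil (by omega)]
    simp

-- ===== VERDICT (by name: the statement is the Claim_ definition above) =====
theorem lists_from_indexes_spec : Claim_equal_lists_from_indexes := by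
  intro lol ir _ _
  unfold Spec_lists_from_indexes
  rw [lfi_A_closed, lfi_B_closed]
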